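-- pv_equiv track=rewrite | github.com/Paul-UK/job_hunter_agent | apps/api/app/services/company_research.py | _is_ignored_host
-- ===== SOURCE A (Python) =====
-- IGNORED_HOSTS = {
--     "boards.greenhouse.io",
--     "job-boards.greenhouse.io",
--     "boards-api.greenhouse.io",
--     "api.lever.co",
--     "jobs.lever.co",
--     "linkedin.com",
--     "www.linkedin.com",
-- }
--
-- IGNORED_HOST_SUFFIXES = {
--     "greenhouse.io",
--     "lever.co",
--     "myworkdayjobs.com",
--     "ashbyhq.com",
--     "workable.com",
--     "smartrecruiters.com",
--     "jobvite.com",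
--     "icims.com",
--     "taleo.net",
--     "recruitee.com",
-- }
--
-- def _is_ignored_host(host: str) -> bool:
--     normalized_host = host.lower().replace("www.", "")
--     if not normalized_host:
--         return True
--     if normalized_host in IGNORED_HOSTS:
--         return True
--     return any(
--         normalized_host == suffix or normalized_host.endswith(f".{suffix}")
--         for suffix in IGNORED_HOST_SUFFIXES
--     )
-- ===== SOURCE B (Python) =====
-- IGNORED_HOSTS = {
--     "boards.greenhouse.io",
--     "job-boards.greenhouse.io",
--     "boards-api.greenhouse.io",
--     "api.lever.co",
--     "jobs.lever.co",
--     "linkedin.com",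
--     "www.linkedin.com",
-- }
--
-- IGNORED_HOST_SUFFIXES = {
--     "greenhouse.io",
--     "lever.co",
--     "myworkdayjobs.com",
--     "ashbyhq.com",
--     "workable.com",
--     "smartrecruiters.com",
--     "jobvite.com",
--     "icims.com",
--     "taleo.net",
--     "recruitee.com",
-- }
--
-- def _is_ignored_host(host: str) -> bool:
--     normalized_host = host.lower().replace("www.", "")
--     if not normalized_host:
--         return True
--     if normalized_host in IGNORED_HOSTS:
--         return True
--     if normalized_host in IGNORED_HOST_SUFFIXES:
--         return True
--     # scan the host's own dot positions: tail after any dot in the suffix set?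
--     return any(
--         normalized_host[j] == "." and normalized_host[j + 1:] in IGNORED_HOST_SUFFIXES
--         for j in range(len(normalized_host))
--     )
-- ===== Notes on version B (the rewrite author's own statement) =====
-- stated objective: alternative
-- what changed: Replaces the scan over the 10 suffix constants with == / endswith('.'+suffix) by a single scan over the normalized host's own dot positions, testing each dot-aligned tail by set membership (plus one whole-host membership test).
import Mathlib
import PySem

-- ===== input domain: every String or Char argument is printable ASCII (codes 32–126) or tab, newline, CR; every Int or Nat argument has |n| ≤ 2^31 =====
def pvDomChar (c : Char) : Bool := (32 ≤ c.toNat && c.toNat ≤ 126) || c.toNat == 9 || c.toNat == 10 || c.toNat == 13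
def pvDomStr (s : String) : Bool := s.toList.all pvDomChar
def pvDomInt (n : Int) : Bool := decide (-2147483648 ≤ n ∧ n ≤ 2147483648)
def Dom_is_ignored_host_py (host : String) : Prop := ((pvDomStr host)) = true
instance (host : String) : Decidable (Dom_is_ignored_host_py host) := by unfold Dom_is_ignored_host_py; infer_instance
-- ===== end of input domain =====

-- B replaces the endswith-scan over the suffix constants by a scan over the host's own
-- dot-aligned tails with set membership (alternative traversal, same result).

-- module constants (shared tables, as lists of code points; set membership is order-independent)
def pvIgnoredHosts : List (List Char) :=
  ["boards.greenhouse.io".toList, "job-boards.greenhouse.io".toList,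
   "boards-api.greenhouse.io".toList, "api.lever.co".toList, "jobs.lever.co".toList,
   "linkedin.com".toList, "www.linkedin.com".toList]

def pvIgnoredSuffixes : List (List Char) :=
  ["greenhouse.io".toList, "lever.co".toList, "myworkdayjobs.com".toList,
   "ashbyhq.com".toList, "workable.com".toList, "smartrecruiters.com".toList,
   "jobvite.com".toList, "icims.com".toList, "taleo.net".toList, "recruitee.com".toList]

-- ===== PORT A =====
def is_ignored_host_py (host : String) : Bool :=
  let normalized_host := PySem.Chars.replace (PySem.Chars.lower host.toList) "www.".toList []
  if normalized_host = [] then true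
  else if pvIgnoredHosts.contains normalized_host then true
  else pvIgnoredSuffixes.any (fun suffix =>
    normalized_host == suffix || PySem.Chars.endswith normalized_host ('.' :: suffix))

-- ===== PORT B =====
def is_ignored_host_py_alt (host : String) : Bool :=
  let nh := PySem.Chars.replace (PySem.Chars.lower host.toList) "www.".toList []
  if nh = [] then true
  else if pvIgnoredHosts.contains nh then true
  else if pvIgnoredSuffixes.contains nh then true
  else (List.range nh.length).any (fun j =>
    -- nh[j] with 0 ≤ j < len(nh); nh[j+1:] = nh.drop (j+1), exact for a nonnegative start
    (PySem.List.pyGet? nh (j : Int) == some '.') && pvIgnoredSuffixes.contains (nh.drop (j + 1)))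

-- ===== PRECONDITION & SPEC =====
def Spec_is_ignored_host_py (host : String) (out : Bool) : Prop := out = is_ignored_host_py_alt host
instance (host : String) (out : Bool) : Decidable (Spec_is_ignored_host_py host out) := by unfold Spec_is_ignored_host_py; infer_instance

-- ===== CLAIM (what is proved, stated in full; the proofs are below) =====
def Claim_equal_is_ignored_host_py : Prop := ∀ (host : String), Dom_is_ignored_host_py host → Spec_is_ignored_host_py host (is_ignored_host_py host)

-- ===== LEMMAS AND PROOFS =====

-- '.'-prefixed suffix of nh ↔ some dot position j of nh has exactly s after it
theorem dot_suffix_iff (nh s : List Char) :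
    ('.' :: s) <:+ nh ↔ ∃ j, ∃ h : j < nh.length, nh[j] = '.' ∧ nh.drop (j + 1) = s := by
  constructor
  · rintro ⟨pre, rfl⟩
    refine ⟨pre.length, by simp, ?_, ?_⟩
    · rw [List.getElem_append_right (le_refl _)]; simp
    · have : pre.length + 1 = (pre ++ ['.']).length := by simp
      rw [show pre ++ '.' :: s = (pre ++ ['.']) ++ s by simp, this, List.drop_left]
  · rintro ⟨j, h, hdot, hdrop⟩
    have h2 : nh.drop j = '.' :: s := by
      rw [List.drop_eq_getElem_cons h, hdot, hdrop]
    exact ⟨nh.take j, by rw [← h2, List.take_append_drop]⟩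

theorem any_eq (nh : List Char) :
    (pvIgnoredSuffixes.any (fun suffix =>
        nh == suffix || PySem.Chars.endswith nh ('.' :: suffix)))
    = (pvIgnoredSuffixes.contains nh
       || (List.range nh.length).any (fun j =>
            (PySem.List.pyGet? nh (j : Int) == some '.')
              && pvIgnoredSuffixes.contains (nh.drop (j + 1)))) := by
  rw [Bool.eq_iff_iff]
  simp only [List.any_eq_true, Bool.or_eq_true, Bool.and_eq_true, beq_iff_eq,
    PySem.Chars.endswith_iff, List.contains_eq_mem, List.mem_range,
    PySem.List.pyGet?_natCast, decide_eq_true_eq]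
  constructor
  · rintro ⟨s, hs, h | h⟩
    · exact Or.inl (h ▸ hs)
    · rcases (dot_suffix_iff nh s).1 h with ⟨j, hj, hdot, hdrop⟩
      exact Or.inr ⟨j, hj, by simp [List.getElem?_eq_getElem hj, hdot], hdrop ▸ hs⟩
  · rintro (h | ⟨j, hj, hdot, hmem⟩)
    · exact ⟨nh, h, Or.inl rfl⟩
    · refine ⟨nh.drop (j + 1), hmem, Or.inr ?_⟩
      refine (dot_suffix_iff nh _).2 ⟨j, hj, ?_, rfl⟩
      simpa [List.getElem?_eq_getElem hj] using hdot

-- ===== VERDICT (by name: the statement is the Claim_ definition above) =====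
theorem is_ignored_host_py_spec : Claim_equal_is_ignored_host_py := by
  intro host _
  unfold Spec_is_ignored_host_py is_ignored_host_py is_ignored_host_py_alt
  set nh := PySem.Chars.replace (PySem.Chars.lower host.toList) "www.".toList [] with hnh
  by_cases h0 : nh = []
  · simp [h0]
  · by_cases h1 : pvIgnoredHosts.contains nh
    · simp only [List.contains_eq_mem, decide_eq_true_eq] at h1
      simp [h0, h1]
    · simp only [List.contains_eq_mem, decide_eq_true_eq] at h1
      simp only [h0, if_false]
      rw [any_eq]
      simp [h1, List.contains_eq_mem]
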